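-- pv_equiv track=rewrite | github.com/wothie/ipa-steno | to_stems.py | recurse_compounds
-- ===== SOURCE A (Python) =====
-- def recurse_compounds(splits, compounds):
--     """
--     expects a [(<english>, <ipa>)] and a dictionary as generated in split_compounds
--     returns a new list which is broken down as far as possible into compounds
--     If used in sequence, the iterator should sort stems from shortest to longest
--     """
--     result = []
--     for split in splits:
--         intermediate_result = [[]]
--         for stem, ipa in split:
--             if stem not in compounds or not compounds[stem]:
--                 # this stem cannot be reduced further
--                 intermediate_result = [intermediate_part + [(stem, ipa)]
--                                        for intermediate_part in intermediate_result]
--             else: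
--                 # all combinations to spell all splits
--                 intermediate_result = [intermediate_part + compound
--                                        for intermediate_part in intermediate_result
--                                        for compound in compounds[stem]]
--         result += intermediate_result
--     return result
-- ===== SOURCE B (Python) =====
-- def _expand(choices):
--     # cartesian product of option lists, earlier entries varying slowest,
--     # concatenating the chosen sub-lists
--     if not choices:
--         return [[]]
--     rest = _expand(choices[1:])
--     return [part + tail for part in choices[0] for tail in rest]
--
--
-- def recurse_compounds(splits, compounds):
--     """
--     expects a [(<english>, <ipa>)] and a dictionary as generated in split_compounds
--     returns a new list which is broken down as far as possible into compounds
--     """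
--     result = []
--     for split in splits:
--         choices = [compounds[stem] if compounds.get(stem) else [[(stem, ipa)]]
--                    for stem, ipa in split]
--         result += _expand(choices)
--     return result
-- ===== Notes on version B (the rewrite author's own statement) =====
-- stated objective: alternative
-- what changed: Replaces the per-stem left fold over a growing accumulator with a precomputed per-stem choice table consumed by one right-recursive cartesian-product expansion.
import Mathlib
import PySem

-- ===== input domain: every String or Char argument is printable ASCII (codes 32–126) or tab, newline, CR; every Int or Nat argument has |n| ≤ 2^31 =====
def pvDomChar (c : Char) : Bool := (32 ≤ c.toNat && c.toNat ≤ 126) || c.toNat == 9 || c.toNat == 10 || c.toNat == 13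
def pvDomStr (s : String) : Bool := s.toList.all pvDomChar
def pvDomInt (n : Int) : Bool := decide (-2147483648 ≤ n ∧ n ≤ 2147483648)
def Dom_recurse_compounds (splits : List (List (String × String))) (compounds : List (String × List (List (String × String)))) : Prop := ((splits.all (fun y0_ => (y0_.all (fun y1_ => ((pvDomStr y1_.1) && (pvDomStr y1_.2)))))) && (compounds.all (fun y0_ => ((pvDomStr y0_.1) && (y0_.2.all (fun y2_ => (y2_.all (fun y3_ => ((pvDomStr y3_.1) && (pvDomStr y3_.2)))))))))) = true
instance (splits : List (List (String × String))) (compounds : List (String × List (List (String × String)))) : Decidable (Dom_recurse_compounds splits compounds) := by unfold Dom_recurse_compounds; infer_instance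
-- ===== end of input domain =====

-- B replaces A's per-stem accumulator fold with a per-stem choice table consumed by one
-- right-recursive cartesian-product expansion (alternative decomposition; same cost).

-- Shared dict lookup: first-match association-list lookup defaulting to [] (Python's
-- 'stem not in compounds or not compounds[stem]' collapses to 'this lookup = []').
def pvLookup (compounds : List (String × List (List (String × String)))) (k : String) : List (List (String × String)) :=
  match compounds.find? (fun q => q.1 == k) with
  | none => []
  | some q => q.2

-- ===== PORT A =====
-- one step of A's inner loop over (stem, ipa) pairs, updating intermediate_result
def pvStepA (compounds : List (String × List (List (String × String)))) (inter : List (List (String × String))) (p : String × String) : List (List (String × String)) :=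
  let cs := pvLookup compounds p.1
  if cs = [] then inter.map (fun part => part ++ [(p.1, p.2)])
  else inter.flatMap (fun part => cs.map (fun compound => part ++ compound))

def recurse_compounds (splits : List (List (String × String))) (compounds : List (String × List (List (String × String)))) : List (List (String × String)) :=
  splits.foldl (fun result split => result ++ split.foldl (pvStepA compounds) [[]]) []

-- ===== PORT B =====
-- cartesian product of option lists, earlier entries varying slowest, concatenating choices
def pvExpand (choices : List (List (List (String × String)))) : List (List (String × String)) :=
  match choices with
  | [] => [[]]
  | c :: rest => c.flatMap (fun part => (pvExpand rest).map (fun tail => part ++ tail))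

-- per-stem option list: the stem's compounds, or the stem itself if it has none
def pvChoice (compounds : List (String × List (List (String × String)))) (p : String × String) : List (List (String × String)) :=
  let cs := pvLookup compounds p.1
  if cs = [] then [[(p.1, p.2)]] else cs

def recurse_compounds_alt (splits : List (List (String × String))) (compounds : List (String × List (List (String × String)))) : List (List (String × String)) :=
  splits.foldl (fun result split => result ++ pvExpand (split.map (pvChoice compounds))) []

-- ===== PRECONDITION & SPEC =====
def Spec_recurse_compounds (splits : List (List (String × String))) (compounds : List (String × List (List (String × String)))) (out : List (List (String × String))) : Prop := out = recurse_compounds_alt splits compounds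
instance (splits : List (List (String × String))) (compounds : List (String × List (List (String × String)))) (out : List (List (String × String))) : Decidable (Spec_recurse_compounds splits compounds out) := by unfold Spec_recurse_compounds; infer_instance

-- ===== CLAIM (what is proved, stated in full; the proofs are below) =====
def Claim_equal_recurse_compounds : Prop := ∀ (splits : List (List (String × String))) (compounds : List (String × List (List (String × String)))), Dom_recurse_compounds splits compounds → Spec_recurse_compounds splits compounds (recurse_compounds splits compounds)

-- ===== LEMMAS AND PROOFS =====

-- A's inner fold from any accumulator = each accumulated part prefixed onto B's expansion
theorem innerA_eq (compounds : List (String × List (List (String × String))))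
    (split : List (String × String)) (acc : List (List (String × String))) :
    split.foldl (pvStepA compounds) acc
      = acc.flatMap (fun part => (pvExpand (split.map (pvChoice compounds))).map (fun tail => part ++ tail)) := by
  induction split generalizing acc with
  | nil => simp [pvExpand]
  | cons p ps ih =>
    simp only [List.foldl_cons, List.map_cons, pvExpand]
    rw [ih]
    by_cases h : pvLookup compounds p.1 = []
    · simp [pvStepA, pvChoice, h, List.flatMap_map, List.map_map, Function.comp_def]
    · simp [pvStepA, pvChoice, h, List.flatMap_map, List.map_flatMap, List.map_map,
        List.flatMap_assoc, Function.comp_def, List.append_assoc]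

-- ===== VERDICT (by name: the statement is the Claim_ definition above) =====
theorem recurse_compounds_spec : Claim_equal_recurse_compounds := by
  intro splits compounds _
  unfold Spec_recurse_compounds recurse_compounds recurse_compounds_alt
  have hstep : ∀ split : List (String × String),
      split.foldl (pvStepA compounds) [[]] = pvExpand (split.map (pvChoice compounds)) := by
    intro split
    rw [innerA_eq]
    simp
  simp only [hstep]
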